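-- pv_equiv track=rewrite | github.com/brightway-lca/brightway2-io | bw2io/modified_database.py | get_reason
-- ===== SOURCE A (Python) =====
-- def get_reason(exc_tuple, data):
--     """Get reason why exc_tuple not in data. Reasons are:
--         1) Changed amount
--         2) Missing
--     """
--     if exc_tuple[0] not in [obj[0] for obj in data]:
--         return "Missing"
--     else:
--         matched_amounts = ", ".join(
--             ["{}".format(obj[1]) for obj in data if obj[0] == exc_tuple[0]]
--         )
--         return "New amount: {} to {}".format(exc_tuple[1], matched_amounts)
-- ===== SOURCE B (Python) =====
-- def get_reason(exc_tuple, data):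
--     """Build a dict index key -> list of amounts in one grouping pass,
--     then answer by a single dict lookup."""
--     groups = {}
--     for key, amount in data:
--         groups[key] = groups.get(key, []) + [amount]
--     if exc_tuple[0] not in groups:
--         return "Missing"
--     return "New amount: {} to {}".format(
--         exc_tuple[1], ", ".join("{}".format(a) for a in groups[exc_tuple[0]])
--     )
-- ===== Notes on version B (the rewrite author's own statement) =====
-- stated objective: alternative
-- what changed: B builds a dict index mapping each key to its list of amounts in one grouping pass and then answers by a single dict lookup (membership decides Missing), replacing A's projected-list membership pass plus filter-and-join pass over the raw list.
import Mathlib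
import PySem

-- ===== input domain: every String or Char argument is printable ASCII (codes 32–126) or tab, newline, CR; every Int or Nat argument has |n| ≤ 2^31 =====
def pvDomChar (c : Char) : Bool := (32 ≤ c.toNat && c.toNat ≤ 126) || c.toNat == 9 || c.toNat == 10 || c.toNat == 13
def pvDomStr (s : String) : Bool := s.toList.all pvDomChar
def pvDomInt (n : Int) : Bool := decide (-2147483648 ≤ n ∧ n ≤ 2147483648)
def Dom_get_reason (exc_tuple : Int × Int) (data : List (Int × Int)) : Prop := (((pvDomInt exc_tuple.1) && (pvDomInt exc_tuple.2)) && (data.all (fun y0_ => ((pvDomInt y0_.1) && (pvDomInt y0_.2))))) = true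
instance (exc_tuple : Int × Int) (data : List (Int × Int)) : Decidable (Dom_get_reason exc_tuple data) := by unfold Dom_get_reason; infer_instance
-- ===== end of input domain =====

-- B replaces A's membership pass over a projected list plus filter+join pass by a
-- dict index (key -> list of amounts) built in one grouping pass, then one lookup
-- (objective: alternative data structure, same cost).

-- ===== PORT A =====
def get_reason (exc_tuple : Int × Int) (data : List (Int × Int)) : String :=
  if exc_tuple.1 ∉ data.map (fun obj => obj.1) then "Missing"
  else
    let matched_amounts :=
      PySem.Str.join ", "
        ((data.filter (fun obj => obj.1 == exc_tuple.1)).map (fun obj => PySem.Int.toStr obj.2))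
    "New amount: " ++ PySem.Int.toStr exc_tuple.2 ++ " to " ++ matched_amounts

-- ===== PORT B =====
def get_reason_alt (exc_tuple : Int × Int) (data : List (Int × Int)) : String :=
  let groups : PySem.Dict Int (List Int) :=
    data.foldl (fun d p => d.modify p.1 [] (fun l => l ++ [p.2])) PySem.Dict.empty
  if groups.contains exc_tuple.1 = false then "Missing"
  else
    -- groups[exc_tuple[0]] is guarded by the membership test, so getD is exact here
    "New amount: " ++ PySem.Int.toStr exc_tuple.2 ++ " to " ++
      PySem.Str.join ", " ((groups.getD exc_tuple.1 []).map PySem.Int.toStr)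

-- ===== PRECONDITION & SPEC =====
def Spec_get_reason (exc_tuple : Int × Int) (data : List (Int × Int)) (out : String) : Prop := out = get_reason_alt exc_tuple data
instance (exc_tuple : Int × Int) (data : List (Int × Int)) (out : String) : Decidable (Spec_get_reason exc_tuple data out) := by unfold Spec_get_reason; infer_instance

-- ===== CLAIM (what is proved, stated in full; the proofs are below) =====
def Claim_equal_get_reason : Prop := ∀ (exc_tuple : Int × Int) (data : List (Int × Int)), Dom_get_reason exc_tuple data → Spec_get_reason exc_tuple data (get_reason exc_tuple data)

-- ===== LEMMAS AND PROOFS =====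
theorem groups_contains (k : Int) (data : List (Int × Int)) :
    (data.foldl (fun d p => d.modify p.1 [] (fun l => l ++ [p.2])) PySem.Dict.empty).contains k
      = true ↔ k ∈ data.map (fun obj => obj.1) := by
  rw [PySem.Dict.contains_iff_mem_keys,
      PySem.Dict.keys_foldl_modify_key (key := fun p : Int × Int => p.1)
        (f := fun _ p => fun l => l ++ [p.2])]
  simp [PySem.Set.mem_update, PySem.Dict.keys_empty]

theorem groups_getD (k : Int) (data : List (Int × Int)) :
    (data.foldl (fun d p => d.modify p.1 [] (fun l => l ++ [p.2])) PySem.Dict.empty).getD k []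
      = (data.filter (fun obj => obj.1 == k)).map (fun obj => obj.2) := by
  rw [PySem.Dict.getD_foldl_modify_append]
  simp

-- ===== VERDICT (by name: the statement is the Claim_ definition above) =====
theorem get_reason_spec : Claim_equal_get_reason := by
  intro t data _
  show get_reason t data = get_reason_alt t data
  unfold get_reason get_reason_alt
  by_cases h : t.1 ∈ data.map (fun obj => obj.1)
  · have hc : (data.foldl (fun d p => d.modify p.1 [] (fun l => l ++ [p.2]))
        PySem.Dict.empty).contains t.1 = true := (groups_contains _ _).mpr h
    rw [if_neg (not_not_intro h)]
    simp only [hc, groups_getD, List.map_map]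
    rfl
  · have hc : ¬ (data.foldl (fun d p => d.modify p.1 [] (fun l => l ++ [p.2]))
        PySem.Dict.empty).contains t.1 = true :=
      fun hc => h ((groups_contains _ _).mp hc)
    rw [if_pos h, if_pos (Bool.eq_false_iff.mpr (by simpa using hc) )]
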